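-- pv_equiv track=rewrite | github.com/javierunix/ca_computerscience | CS101/code_challenges_2/dict.py | count_first_letter
-- ===== SOURCE A (Python) =====
-- def count_first_letter(names):
--
-- 	my_dict = {}
--
-- 	for key, value in names.items():
-- 		first_letter = key[0]
-- 		if first_letter not in my_dict:
-- 			my_dict[first_letter] = 0
-- 		my_dict[first_letter] += len(value)
--
-- 	return my_dict
-- ===== SOURCE B (Python) =====
-- def count_first_letter(names):
--     letters = []
--     for key in names:
--         if key[0] not in letters:
--             letters.append(key[0])
--     return {c: sum(len(v) for k, v in names.items() if k[0] == c) for c in letters}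
-- ===== Notes on version B (the rewrite author's own statement) =====
-- stated objective: alternative
-- what changed: A keeps a running dict accumulator updated per item; B first deduplicates the keys' first letters in order of first occurrence and then builds the result with one filtered sum of value-lengths per letter, with no running accumulator.
import Mathlib
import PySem

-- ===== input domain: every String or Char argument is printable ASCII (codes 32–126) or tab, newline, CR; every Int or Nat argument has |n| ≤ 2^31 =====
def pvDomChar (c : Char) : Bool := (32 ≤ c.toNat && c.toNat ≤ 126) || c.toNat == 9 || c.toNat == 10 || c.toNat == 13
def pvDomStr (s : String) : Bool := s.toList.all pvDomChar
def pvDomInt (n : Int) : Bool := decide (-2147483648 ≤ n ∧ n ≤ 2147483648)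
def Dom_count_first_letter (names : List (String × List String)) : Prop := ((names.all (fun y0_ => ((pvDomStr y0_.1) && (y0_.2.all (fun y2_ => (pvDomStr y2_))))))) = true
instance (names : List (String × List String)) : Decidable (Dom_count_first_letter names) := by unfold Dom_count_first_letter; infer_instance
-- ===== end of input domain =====

-- B replaces A's running-accumulator dict pass with a dedup-the-first-letters pass followed by a
-- filtered sum per letter (objective: alternative decomposition, not faster).


-- ===== PORT A =====
def count_first_letter (names : List (String × List String)) : List (String × Int) :=
  (names.foldl (fun my_dict kv =>
      match PySem.Str.pyGet? kv.1 0 with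
      | none => my_dict  -- key[0] raises IndexError on an empty key; such inputs are outside Pre_
      | some c =>
        let first_letter := String.singleton c
        let my_dict := if my_dict.contains first_letter then my_dict
                       else my_dict.insert first_letter 0
        my_dict.insert first_letter (my_dict.getD first_letter 0 + (kv.2.length : Int)))
    (PySem.Dict.empty : PySem.Dict String Int)).items

-- ===== PORT B =====
def count_first_letter_alt (names : List (String × List String)) : List (String × Int) :=
  let letters : PySem.Set Char := names.foldl (fun acc kv =>
      match PySem.Str.pyGet? kv.1 0 with
      | none => acc  -- key[0] raises IndexError on an empty key; such inputs are outside Pre_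
      | some c => PySem.Set.add acc c) PySem.Set.empty
  letters.map (fun c => (String.singleton c,
      ((names.filter (fun kv => PySem.Str.pyGet? kv.1 0 == some c)).map
        (fun kv => (kv.2.length : Int))).sum))

-- ===== PRECONDITION & SPEC =====
-- Pre_ excludes inputs containing an empty-string key, on which Python A raises IndexError (key[0]).
def Pre_count_first_letter (names : List (String × List String)) : Prop :=
  ∀ p ∈ names, p.1.toList ≠ []
instance (names : List (String × List String)) : Decidable (Pre_count_first_letter names) := by
  unfold Pre_count_first_letter; infer_instance

def pvWitness_count_first_letter : (List (String × List String)) :=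
  [("ann", ["x", "yz"]), ("bob", []), ("amy", ["q"])]

def Spec_count_first_letter (names : List (String × List String)) (out : List (String × Int)) : Prop := out = count_first_letter_alt names
instance (names : List (String × List String)) (out : List (String × Int)) : Decidable (Spec_count_first_letter names out) := by unfold Spec_count_first_letter; infer_instance

-- ===== CLAIM (what is proved, stated in full; the proofs are below) =====
def Claim_equal_count_first_letter : Prop := ∀ (names : List (String × List String)), Dom_count_first_letter names → Pre_count_first_letter names → Spec_count_first_letter names (count_first_letter names)

-- ===== LEMMAS AND PROOFS =====

-- first character of a pair's key
def pvKey (p : String × List String) : Char := p.1.toList.headI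
def pvLen (p : String × List String) : Int := p.2.length

lemma pyGet0_eq (s : String) (h : s.toList ≠ []) :
    PySem.Str.pyGet? s 0 = some s.toList.headI := by
  cases hs : s.toList with
  | nil => exact absurd hs h
  | cons a l =>
    have : PySem.Str.pyGet? s 0 = s.toList[0]? := by
      simpa using PySem.Str.pyGet?_natCast s 0
    simp [hs]

lemma getD_fold {α : Type} (l : List α) (key : α → String) (val : α → Int)
    (d : PySem.Dict String Int) (c : String) :
    (l.foldl (fun d p => d.insert (key p) (d.getD (key p) 0 + val p)) d).getD c 0
      = d.getD c 0 + ((l.filter (fun p => key p == c)).map val).sum := by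
  induction l generalizing d with
  | nil => simp
  | cons a l ih =>
    simp only [List.foldl_cons, ih, List.filter_cons]
    by_cases h : key a = c
    · simp [h]; ring
    · simp [h, PySem.Dict.getD_insert, Ne.symm h]

lemma discard_map {α β : Type} [DecidableEq α] [DecidableEq β] (f : α → β)
    (hf : Function.Injective f) (s : List α) (a : α) :
    PySem.Set.discard (s.map f) (f a) = (PySem.Set.discard s a).map f := by
  induction s with
  | nil => simp [PySem.Set.discard]
  | cons x s ih =>
    by_cases h : x = a <;>
      simp [PySem.Set.discard, h, hf.eq_iff, List.filter_map] at ih ⊢ <;>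
      simpa [PySem.Set.discard, List.filter_map, Function.comp] using ih

lemma ofList_map_inj {α β : Type} [DecidableEq α] [DecidableEq β] (f : α → β)
    (hf : Function.Injective f) (l : List α) :
    PySem.Set.ofList (l.map f) = (PySem.Set.ofList l).map f := by
  induction l with
  | nil => simp [PySem.Set.ofList_nil]
  | cons a l ih =>
    simp only [List.map_cons, PySem.Set.ofList_cons, ih, discard_map f hf, List.map_cons]

lemma singleton_inj : Function.Injective String.singleton := by
  intro a b h
  have := congrArg String.toList h
  simpa using this

theorem count_first_letter_spec : Claim_equal_count_first_letter := by
  intro names _ hpre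
  unfold Spec_count_first_letter count_first_letter count_first_letter_alt
  -- normalize A's loop body to a single insert
  have hA : names.foldl (fun my_dict kv =>
      match PySem.Str.pyGet? kv.1 0 with
      | none => my_dict
      | some c =>
        let first_letter := String.singleton c
        let my_dict := if my_dict.contains first_letter then my_dict
                       else my_dict.insert first_letter 0
        my_dict.insert first_letter (my_dict.getD first_letter 0 + (kv.2.length : Int)))
      (PySem.Dict.empty : PySem.Dict String Int)
    = names.foldl (fun d p =>
        d.insert (String.singleton (pvKey p))
          (d.getD (String.singleton (pvKey p)) 0 + pvLen p)) PySem.Dict.empty := by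
    apply PySem.List.foldl_congr_mem
    intro d p hp
    rw [pyGet0_eq p.1 (hpre p hp)]
    simp only [pvKey, pvLen]
    by_cases h : d.contains (String.singleton p.1.toList.headI)
    · rw [if_pos h]
    · rw [if_neg h, PySem.Dict.getD_insert_self, PySem.Dict.insert_insert_self,
        PySem.Dict.getD_of_not_contains _ _ (by simpa using h), zero_add]
  have hB : names.foldl (fun acc kv =>
      match PySem.Str.pyGet? kv.1 0 with
      | none => acc
      | some c => PySem.Set.add acc c) PySem.Set.empty
    = PySem.Set.ofList (names.map pvKey) := by
    have h1 : names.foldl (fun acc kv =>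
        match PySem.Str.pyGet? kv.1 0 with
        | none => acc
        | some c => PySem.Set.add acc c) PySem.Set.empty
      = names.foldl (fun acc p => PySem.Set.add acc (pvKey p)) PySem.Set.empty := by
      apply PySem.List.foldl_congr_mem
      intro acc p hp
      rw [pyGet0_eq p.1 (hpre p hp)]
      rfl
    rw [h1, ← PySem.Set.update_map_eq_foldl_add, PySem.Set.update_empty]
  rw [hA, hB]
  have hnd : (names.foldl (fun d p =>
        d.insert (String.singleton (pvKey p))
          (d.getD (String.singleton (pvKey p)) 0 + pvLen p)) PySem.Dict.empty).keys.Nodup :=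
    PySem.Dict.nodup_keys_foldl_insert_key _ _ _ _ PySem.Dict.nodup_keys_empty
  rw [PySem.Dict.items_eq_map_keys _ hnd 0]
  rw [PySem.Dict.keys_foldl_insert_key, PySem.Dict.keys_empty, PySem.Set.update_nil_left]
  have hmap : names.map (fun p => String.singleton (pvKey p))
      = (names.map pvKey).map String.singleton := by simp [Function.comp]
  rw [hmap, ofList_map_inj _ singleton_inj, List.map_map]
  apply List.map_congr_left
  intro c _
  simp only [Function.comp, Prod.mk.injEq, true_and]
  rw [getD_fold names (fun p => String.singleton (pvKey p)) pvLen]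
  have hfil : names.filter (fun p => String.singleton (pvKey p) == String.singleton c)
      = names.filter (fun kv => PySem.Str.pyGet? kv.1 0 == some c) := by
    apply List.filter_congr
    intro p hp
    rw [pyGet0_eq p.1 (hpre p hp)]
    simp [pvKey, singleton_inj.eq_iff]
  rw [hfil, PySem.Dict.getD_empty, zero_add]
  rfl
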